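-- pv_equiv track=rewrite | github.com/Ayush1298567/central_computer_sar-drone-swarm | backend/app/ai/knowledge_graph.py | _categorize_lesson
-- ===== SOURCE A (Python) =====
-- def _categorize_lesson(lesson: str) -> str:
--     """Categorize lesson based on content"""
--     lesson_lower = lesson.lower()
--
--     if any(word in lesson_lower for word in ["battery", "power", "energy"]):
--         return "power_management"
--     elif any(word in lesson_lower for word in ["weather", "wind", "rain"]):
--         return "weather_conditions"
--     elif any(word in lesson_lower for word in ["terrain", "landing", "obstacle"]):
--         return "terrain_handling"
--     elif any(word in lesson_lower for word in ["communication", "signal", "connection"]):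
--         return "communication"
--     elif any(word in lesson_lower for word in ["pattern", "search", "coverage"]):
--         return "search_strategy"
--     else:
--         return "general"
-- ===== SOURCE B (Python) =====
-- # B: min-priority selection — compute ALL keyword hits via str.find in one pass,
-- # then pick the category with the smallest priority index; no short-circuit if/elif chain.
-- _CATEGORIES = ["power_management", "weather_conditions", "terrain_handling",
--                "communication", "search_strategy"]
-- _KEYWORD_PRIORITY = {
--     "battery": 0, "power": 0, "energy": 0,
--     "weather": 1, "wind": 1, "rain": 1,
--     "terrain": 2, "landing": 2, "obstacle": 2,
--     "communication": 3, "signal": 3, "connection": 3,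
--     "pattern": 4, "search": 4, "coverage": 4,
-- }
--
-- def _categorize_lesson(lesson: str) -> str:
--     low = lesson.lower()
--     hits = [prio for kw, prio in _KEYWORD_PRIORITY.items() if low.find(kw) != -1]
--     if hits:
--         return _CATEGORIES[min(hits)]
--     return "general"
-- ===== Notes on version B (the rewrite author's own statement) =====
-- stated objective: alternative
-- what changed: Instead of a short-circuiting if/elif chain of any() membership tests, B exhaustively collects the priority index of every keyword whose str.find is non-negative and then selects the category with the minimum priority, indexing a category array.
import Mathlib
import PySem

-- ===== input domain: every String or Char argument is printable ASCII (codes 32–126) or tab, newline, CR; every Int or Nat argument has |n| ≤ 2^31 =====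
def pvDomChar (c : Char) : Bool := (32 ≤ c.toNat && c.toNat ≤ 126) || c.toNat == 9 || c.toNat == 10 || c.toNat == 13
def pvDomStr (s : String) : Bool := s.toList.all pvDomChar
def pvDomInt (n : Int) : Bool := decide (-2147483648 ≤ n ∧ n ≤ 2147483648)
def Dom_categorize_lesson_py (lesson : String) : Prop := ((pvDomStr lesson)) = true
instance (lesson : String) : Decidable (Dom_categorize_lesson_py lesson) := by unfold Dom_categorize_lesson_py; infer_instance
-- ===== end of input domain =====

-- B replaces A's short-circuiting if/elif chain by an exhaustive hit collection (str.find over all 15 keywords) followed by min-priority selection into a category array (alternative decomposition, same cost).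


-- ===== PORT A =====
def categorize_lesson_py (lesson : String) : String :=
  let lesson_lower := PySem.Str.lower lesson
  if (["battery", "power", "energy"].any (fun word => PySem.Str.isIn word lesson_lower)) then
    "power_management"
  else if (["weather", "wind", "rain"].any (fun word => PySem.Str.isIn word lesson_lower)) then
    "weather_conditions"
  else if (["terrain", "landing", "obstacle"].any (fun word => PySem.Str.isIn word lesson_lower)) then
    "terrain_handling"
  else if (["communication", "signal", "connection"].any (fun word => PySem.Str.isIn word lesson_lower)) then
    "communication"
  else if (["pattern", "search", "coverage"].any (fun word => PySem.Str.isIn word lesson_lower)) then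
    "search_strategy"
  else
    "general"

-- ===== PORT B =====
-- B-side helpers: the category array and the keyword → priority dict (association list, insertion order)
def pvCategories : List String :=
  ["power_management", "weather_conditions", "terrain_handling", "communication", "search_strategy"]

def pvKeywordPriority : List (String × Int) :=
  [("battery", 0), ("power", 0), ("energy", 0),
   ("weather", 1), ("wind", 1), ("rain", 1),
   ("terrain", 2), ("landing", 2), ("obstacle", 2),
   ("communication", 3), ("signal", 3), ("connection", 3),
   ("pattern", 4), ("search", 4), ("coverage", 4)]

def categorize_lesson_py_alt (lesson : String) : String :=
  let low := PySem.Str.lower lesson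
  -- hits = [prio for kw, prio in _KEYWORD_PRIORITY.items() if low.find(kw) != -1]
  let hits := pvKeywordPriority.filterMap (fun kp => if PySem.Str.find low kp.1 ≠ -1 then some kp.2 else none)
  if hits ≠ [] then
    -- _CATEGORIES[min(hits)]: min(hits) ∈ {0..4}, so the index is always in range and getD's default is never used
    match PySem.List.min? hits (fun x => x) with
    | some m => (PySem.List.pyGet? pvCategories m).getD "general"
    | none => "general"
  else
    "general"

-- ===== PRECONDITION & SPEC =====
def Spec_categorize_lesson_py (lesson : String) (out : String) : Prop := out = categorize_lesson_py_alt lesson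
instance (lesson : String) (out : String) : Decidable (Spec_categorize_lesson_py lesson out) := by unfold Spec_categorize_lesson_py; infer_instance

-- ===== CLAIM (what is proved, stated in full; the proofs are below) =====
def Claim_equal_categorize_lesson_py : Prop := ∀ (lesson : String), Dom_categorize_lesson_py lesson → Spec_categorize_lesson_py lesson (categorize_lesson_py lesson)

-- ===== LEMMAS AND PROOFS =====

-- 'low.find(kw) != -1' and 'kw in low' test the same thing
theorem pvFindIn (low sub : String) :
    (PySem.Str.find low sub ≠ -1) ↔ (PySem.Str.isIn sub low = true) := by
  rw [PySem.Str.find_ne_neg_one_iff, PySem.Str.isIn_iff_infix]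

-- B's selection expression returns category j when j is a hit and no smaller priority is hit
theorem pvPick (hits : List Int) (j : Int)
    (hmem : j ∈ hits) (hlb : ∀ x ∈ hits, j ≤ x) :
    (if hits ≠ [] then
       match PySem.List.min? hits (fun x => x) with
       | some m => (PySem.List.pyGet? pvCategories m).getD "general"
       | none => "general"
     else "general")
    = (PySem.List.pyGet? pvCategories j).getD "general" := by
  have hne : hits ≠ [] := by rintro rfl; simp at hmem
  rw [if_pos hne]
  cases hmin : PySem.List.min? hits (fun x => x) with
  | none => exact absurd ((PySem.List.min?_eq_none_iff _ _).1 hmin) hne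
  | some m =>
    have h1 : j ≤ m := hlb m (PySem.List.min?_mem hmin)
    have h2 : m ≤ j := PySem.List.min?_isMin hmin j hmem
    rw [le_antisymm h2 h1]

-- ===== VERDICT (by name: the statement is the Claim_ definition above) =====
set_option maxHeartbeats 1000000 in
theorem categorize_lesson_py_spec : Claim_equal_categorize_lesson_py := by
  intro lesson _
  unfold Spec_categorize_lesson_py categorize_lesson_py categorize_lesson_py_alt
  simp only [List.any_cons, List.any_nil, Bool.or_false, pvFindIn]
  set low := PySem.Str.lower lesson with hlow
  by_cases h0 : (PySem.Str.isIn "battery" low || (PySem.Str.isIn "power" low || PySem.Str.isIn "energy" low)) = true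
  · rw [if_pos h0, pvPick _ 0]
    · decide
    · simp only [Bool.or_eq_true] at h0
      rcases h0 with h | h | h
      · exact List.mem_filterMap.2 ⟨("battery", 0), by simp [pvKeywordPriority], by rw [if_pos h]⟩
      · exact List.mem_filterMap.2 ⟨("power", 0), by simp [pvKeywordPriority], by rw [if_pos h]⟩
      · exact List.mem_filterMap.2 ⟨("energy", 0), by simp [pvKeywordPriority], by rw [if_pos h]⟩
    · intro x hx
      obtain ⟨a, ha, hfa⟩ := List.mem_filterMap.1 hx
      fin_cases ha <;> split at hfa <;> simp_all <;> omega
  · rw [if_neg h0]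
    simp only [Bool.or_eq_true, not_or, Bool.not_eq_true] at h0
    by_cases h1 : (PySem.Str.isIn "weather" low || (PySem.Str.isIn "wind" low || PySem.Str.isIn "rain" low)) = true
    · rw [if_pos h1, pvPick _ 1]
      · decide
      · simp only [Bool.or_eq_true] at h1
        rcases h1 with h | h | h
        · exact List.mem_filterMap.2 ⟨("weather", 1), by simp [pvKeywordPriority], by rw [if_pos h]⟩
        · exact List.mem_filterMap.2 ⟨("wind", 1), by simp [pvKeywordPriority], by rw [if_pos h]⟩
        · exact List.mem_filterMap.2 ⟨("rain", 1), by simp [pvKeywordPriority], by rw [if_pos h]⟩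
      · intro x hx
        obtain ⟨a, ha, hfa⟩ := List.mem_filterMap.1 hx
        fin_cases ha <;> split at hfa <;> simp_all <;> omega
    · rw [if_neg h1]
      simp only [Bool.or_eq_true, not_or, Bool.not_eq_true] at h1
      by_cases h2 : (PySem.Str.isIn "terrain" low || (PySem.Str.isIn "landing" low || PySem.Str.isIn "obstacle" low)) = true
      · rw [if_pos h2, pvPick _ 2]
        · decide
        · simp only [Bool.or_eq_true] at h2
          rcases h2 with h | h | h
          · exact List.mem_filterMap.2 ⟨("terrain", 2), by simp [pvKeywordPriority], by rw [if_pos h]⟩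
          · exact List.mem_filterMap.2 ⟨("landing", 2), by simp [pvKeywordPriority], by rw [if_pos h]⟩
          · exact List.mem_filterMap.2 ⟨("obstacle", 2), by simp [pvKeywordPriority], by rw [if_pos h]⟩
        · intro x hx
          obtain ⟨a, ha, hfa⟩ := List.mem_filterMap.1 hx
          fin_cases ha <;> split at hfa <;> simp_all <;> omega
      · rw [if_neg h2]
        simp only [Bool.or_eq_true, not_or, Bool.not_eq_true] at h2
        by_cases h3 : (PySem.Str.isIn "communication" low || (PySem.Str.isIn "signal" low || PySem.Str.isIn "connection" low)) = true
        · rw [if_pos h3, pvPick _ 3]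
          · decide
          · simp only [Bool.or_eq_true] at h3
            rcases h3 with h | h | h
            · exact List.mem_filterMap.2 ⟨("communication", 3), by simp [pvKeywordPriority], by rw [if_pos h]⟩
            · exact List.mem_filterMap.2 ⟨("signal", 3), by simp [pvKeywordPriority], by rw [if_pos h]⟩
            · exact List.mem_filterMap.2 ⟨("connection", 3), by simp [pvKeywordPriority], by rw [if_pos h]⟩
          · intro x hx
            obtain ⟨a, ha, hfa⟩ := List.mem_filterMap.1 hx
            fin_cases ha <;> split at hfa <;> simp_all <;> omega
        · rw [if_neg h3]
          simp only [Bool.or_eq_true, not_or, Bool.not_eq_true] at h3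
          by_cases h4 : (PySem.Str.isIn "pattern" low || (PySem.Str.isIn "search" low || PySem.Str.isIn "coverage" low)) = true
          · rw [if_pos h4, pvPick _ 4]
            · decide
            · simp only [Bool.or_eq_true] at h4
              rcases h4 with h | h | h
              · exact List.mem_filterMap.2 ⟨("pattern", 4), by simp [pvKeywordPriority], by rw [if_pos h]⟩
              · exact List.mem_filterMap.2 ⟨("search", 4), by simp [pvKeywordPriority], by rw [if_pos h]⟩
              · exact List.mem_filterMap.2 ⟨("coverage", 4), by simp [pvKeywordPriority], by rw [if_pos h]⟩
            · intro x hx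
              obtain ⟨a, ha, hfa⟩ := List.mem_filterMap.1 hx
              fin_cases ha <;> split at hfa <;> simp_all <;> omega
          · rw [if_neg h4]
            simp only [Bool.or_eq_true, not_or, Bool.not_eq_true] at h4
            have hnil : pvKeywordPriority.filterMap
                (fun kp => if PySem.Str.isIn kp.1 low = true then some kp.2 else none) = [] := by
              rw [List.filterMap_eq_nil_iff]
              intro a ha
              fin_cases ha <;>
                simp only [h0.1, h0.2.1, h0.2.2, h1.1, h1.2.1, h1.2.2, h2.1, h2.2.1, h2.2.2,
                      h3.1, h3.2.1, h3.2.2, h4.1, h4.2.1, h4.2.2] <;> simp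
            rw [hnil]
            simp
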